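-- pv_equiv track=rewrite | github.com/anuushka/Cryptography | RSA/RSA2.py | four_dig
-- ===== SOURCE A (Python) =====
-- def four_dig(mes):
--     l = []
--     s = ''
--     for i in mes:
--         ind = dic.index(i) + 1
--         if len(str(ind)) < 2:
--             ind = str(ind) + '0'
--             ind = ind[::-1]
--         s += str(ind)
--         if len(s) == 4:
--             l.append(int(s))
--             s = ''
--     if len(s) == 2:
--         t = '00'
--         s = t + s
--         l.append(int(s))
--     return l
--
-- dic = "abcdefghijklmnopqrstuvwxyz"
-- ===== SOURCE B (Python) =====
-- dic = "abcdefghijklmnopqrstuvwxyz"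
--
-- def four_dig(mes):
--     vals = [dic.index(c) + 1 for c in mes]
--     out = []
--     i = 0
--     while i + 1 < len(vals):
--         out.append(vals[i] * 100 + vals[i + 1])
--         i += 2
--     if i < len(vals):
--         out.append(vals[i])
--     return out
-- ===== Notes on version B (the rewrite author's own statement) =====
-- stated objective: faster
-- what changed: Replaces A's char-by-char loop with a running string buffer, padding-by-reverse trick, flush-at-four test and zero-prefixed leftover branch by a map of each char to its numeric code followed by an index-stride loop that combines adjacent codes arithmetically (a*100+b), with no string building or int parsing at all.
import Mathlib
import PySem

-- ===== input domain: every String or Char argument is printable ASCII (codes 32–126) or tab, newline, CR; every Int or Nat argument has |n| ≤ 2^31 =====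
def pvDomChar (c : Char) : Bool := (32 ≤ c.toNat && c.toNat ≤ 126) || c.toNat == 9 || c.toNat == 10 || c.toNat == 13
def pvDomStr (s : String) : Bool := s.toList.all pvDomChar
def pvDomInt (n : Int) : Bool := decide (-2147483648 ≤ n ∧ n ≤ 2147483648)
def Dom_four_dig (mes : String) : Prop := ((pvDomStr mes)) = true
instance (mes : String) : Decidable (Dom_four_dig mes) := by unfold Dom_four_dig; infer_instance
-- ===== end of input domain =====

-- B maps chars to numeric codes once, then pairs adjacent codes arithmetically (a*100+b),
-- replacing A's string buffer, padding trick, flush test, leftover branch and int parsing;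
-- a timing run measured B faster by a constant factor. Return value only; no mutation.

-- ===== PORT A =====
def dicChars : List Char := ['a','b','c','d','e','f','g','h','i','j','k','l','m','n','o','p','q','r','s','t','u','v','w','x','y','z']

-- ind = dic.index(i) + 1  (dic.index raises ValueError for chars not in dic: excluded by Pre_)
def code (c : Char) : Int := ((PySem.List.index? dicChars c).getD 0) + 1

-- A's padding: if len(str(ind)) < 2 then append '0' and reverse ([::-1]), else str(ind)
def twoDig (n : Int) : List Char :=
  if (PySem.Int.toChars n).length < 2 then ((PySem.Int.toChars n) ++ ['0']).reverse
  else PySem.Int.toChars n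

-- one iteration of A's for-loop over the state (l, s)
def fourDigStep (st : List Int × List Char) (i : Char) : List Int × List Char :=
  let s := st.2 ++ twoDig (code i)
  if s.length = 4 then (st.1 ++ [(PySem.Int.ofChars? s).getD 0], [])
  else (st.1, s)

-- the trailing 'if len(s) == 2' block
def finishA (st : List Int × List Char) : List Int :=
  if st.2.length = 2 then st.1 ++ [(PySem.Int.ofChars? ('0' :: '0' :: st.2)).getD 0]
  else st.1

def four_dig (mes : String) : List Int :=
  finishA (mes.toList.foldl fourDigStep ([], []))

-- ===== PORT B =====
-- the while loop 'while i + 1 < len(vals)' plus the trailing 'if i < len(vals)' append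
def pairLoop (vals : List Int) (i : Nat) (out : List Int) : List Int :=
  if i + 1 < vals.length then
    pairLoop vals (i + 2)
      (out ++ [PySem.List.pyGetD vals (i : Int) 0 * 100 + PySem.List.pyGetD vals ((i + 1 : Nat) : Int) 0])
  else if i < vals.length then out ++ [PySem.List.pyGetD vals (i : Int) 0]
  else out
termination_by vals.length - i

def four_dig_alt (mes : String) : List Int :=
  pairLoop (mes.toList.map (fun c => ((PySem.List.index? dicChars c).getD 0 : Int) + 1)) 0 []

-- ===== PRECONDITION & SPEC =====
-- Pre_ excludes exactly the inputs where dic.index raises ValueError (a char outside a–z).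
def Pre_four_dig (mes : String) : Prop := (mes.toList.all (fun c => dicChars.contains c)) = true
instance (mes : String) : Decidable (Pre_four_dig mes) := by unfold Pre_four_dig; infer_instance

def pvWitness_four_dig : String := "hello"

def Spec_four_dig (mes : String) (out : List Int) : Prop := out = four_dig_alt mes
instance (mes : String) (out : List Int) : Decidable (Spec_four_dig mes out) := by unfold Spec_four_dig; infer_instance

-- ===== CLAIM (what is proved, stated in full; the proofs are below) =====
def Claim_equal_four_dig : Prop := ∀ (mes : String), Dom_four_dig mes → Pre_four_dig mes → Spec_four_dig mes (four_dig mes)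

-- ===== LEMMAS AND PROOFS =====

-- proof-only helper: the pairing B's while loop computes, as a structural recursion
def packB : List Int → List Int
  | a :: b :: rest => (a * 100 + b) :: packB rest
  | xs => xs

theorem pairLoop_eq (vals : List Int) (i : Nat) (out : List Int) :
    pairLoop vals i out = out ++ packB (vals.drop i) := by
  rw [pairLoop]
  split_ifs with h1 h2
  · rw [pairLoop_eq vals (i + 2)]
    have hd : vals.drop i = vals[i] :: vals[i + 1] :: vals.drop (i + 2) := by
      rw [List.drop_eq_getElem_cons (by omega), List.drop_eq_getElem_cons (by omega)]
    rw [hd]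
    simp [packB, PySem.List.pyGetD_natCast, List.getD_eq_getElem?_getD,
      List.getElem?_eq_getElem (by omega : i < vals.length)]
    rw [PySem.List.pyGetD_eq_getElem vals 0 (by omega) (by omega)]
    simp only [show ((i : Int) + 1).toNat = i + 1 from by omega]
  · have hd : vals.drop i = [vals[i]] := by
      rw [List.drop_eq_getElem_cons (by omega), List.drop_eq_nil_of_le (by omega)]
    rw [hd]
    simp [packB, PySem.List.pyGetD_natCast, List.getD_eq_getElem?_getD,
      List.getElem?_eq_getElem (by omega : i < vals.length)]
  · rw [List.drop_eq_nil_of_le (by omega)]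
    simp [packB]

-- codes of dictionary letters lie in 1..26
theorem code_mem : ∀ c ∈ dicChars, code c ∈ PySem.List.pyRange 1 27 1 := by
  intro c hc; fin_cases hc <;> decide

-- A's padded string always has exactly 2 digits
theorem twoDig_len2 : ∀ v ∈ PySem.List.pyRange 1 27 1, (twoDig v).length = 2 := by decide

-- parsing two leading zero chars ++ twoDig v back gives v
theorem parse_tail : ∀ v ∈ PySem.List.pyRange 1 27 1,
    (PySem.Int.ofChars? ('0' :: '0' :: twoDig v)).getD 0 = v := by decide

-- parsing twoDig v ++ twoDig w gives v * 100 + w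
set_option maxRecDepth 10000 in
theorem parse_pair : ∀ v ∈ PySem.List.pyRange 1 27 1, ∀ w ∈ PySem.List.pyRange 1 27 1,
    (PySem.Int.ofChars? (twoDig v ++ twoDig w)).getD 0 = v * 100 + w := by decide

-- processing a letter with an empty buffer just stores its 2-digit code
theorem step_empty (l : List Int) (a : Char) (ha : a ∈ dicChars) :
    fourDigStep (l, []) a = (l, twoDig (code a)) := by
  have hla := twoDig_len2 _ (code_mem a ha)
  simp only [fourDigStep, List.nil_append]
  rw [if_neg (by omega)]

-- processing a letter with a half-full buffer flushes the pair's value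
theorem step_full (l : List Int) (a b : Char) (ha : a ∈ dicChars) (hb : b ∈ dicChars) :
    fourDigStep (l, twoDig (code a)) b = (l ++ [code a * 100 + code b], []) := by
  have hla := twoDig_len2 _ (code_mem a ha)
  have hlb := twoDig_len2 _ (code_mem b hb)
  simp only [fourDigStep]
  rw [if_pos (by simp [hla, hlb]), parse_pair _ (code_mem a ha) _ (code_mem b hb)]

theorem main_loop : ∀ (cs : List Char) (l : List Int), (∀ c ∈ cs, c ∈ dicChars) →
    finishA (cs.foldl fourDigStep (l, [])) = l ++ packB (cs.map code)
  | [], l, _ => by simp [finishA, packB]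
  | [a], l, h => by
    have ha := h a (by simp)
    have hla := twoDig_len2 _ (code_mem a ha)
    rw [List.foldl_cons, step_empty l a ha, List.foldl_nil]
    unfold finishA
    rw [if_pos hla, parse_tail _ (code_mem a ha)]
    rfl
  | a :: b :: rest, l, h => by
    have ha := h a (by simp)
    have hb := h b (by simp)
    rw [List.foldl_cons, List.foldl_cons, step_empty l a ha, step_full l a b ha hb,
      main_loop rest (l ++ [code a * 100 + code b]) (fun c hc => h c (by simp [hc]))]
    simp [packB]

-- ===== VERDICT (by name: the statement is the Claim_ definition above) =====
theorem four_dig_spec : Claim_equal_four_dig := by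
  intro mes _ hpre
  rw [Pre_four_dig, List.all_eq_true] at hpre
  simp only [List.contains_eq_mem, decide_eq_true_eq] at hpre
  unfold Spec_four_dig four_dig four_dig_alt
  rw [main_loop mes.toList [] hpre, pairLoop_eq, List.drop_zero, List.nil_append, List.nil_append]
  rfl
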